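-- pv_equiv track=rewrite | github.com/kreeuwijk/omniverse-dsx-blueprint-for-ai-factories | deps/kit-usd-agents/source/modules/data_generation/usdcode/src/usdcode/metafunction_modules/MFPcp.py | report_invalid_asset_paths
-- ===== SOURCE A (Python) =====
-- from typing import Any, Dict, Iterable, List, Optional, Set, Tuple
--
-- def report_invalid_asset_paths(asset_paths: List[str]) -> List[str]:
--     """
--     Report invalid asset paths.
--
--     Args:
--         asset_paths (List[str]): List of asset paths to validate.
--
--     Returns:
--         List[str]: List of invalid asset paths.
--     """
--     invalid_paths = []
--     for path in asset_paths:
--         if not path: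
--             invalid_paths.append(path)
--             continue
--         if not path.startswith("/"):
--             invalid_paths.append(path)
--             continue
--         invalid_chars = ["\\", ":", "*", "?", '"', "<", ">", "|"]
--         if any((char in path for char in invalid_chars)):
--             invalid_paths.append(path)
--             continue
--     return invalid_paths
-- ===== SOURCE B (Python) =====
-- import re
--
-- _VALID = re.compile(r'/[^\\:*?"<>|]*')
--
-- def report_invalid_asset_paths(asset_paths):
--     """Report invalid asset paths (regex-based: a valid path fully matches /[^\\:*?"<>|]*)."""
--     return [p for p in asset_paths if not _VALID.fullmatch(p)]
-- ===== Notes on version B (the rewrite author's own statement) =====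
-- stated objective: idiomatic
-- what changed: Replaces the accumulator loop with three continue-branches by a single list-comprehension filter over one compiled regex fullmatch that encodes all three validity conditions at once.
import Mathlib
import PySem

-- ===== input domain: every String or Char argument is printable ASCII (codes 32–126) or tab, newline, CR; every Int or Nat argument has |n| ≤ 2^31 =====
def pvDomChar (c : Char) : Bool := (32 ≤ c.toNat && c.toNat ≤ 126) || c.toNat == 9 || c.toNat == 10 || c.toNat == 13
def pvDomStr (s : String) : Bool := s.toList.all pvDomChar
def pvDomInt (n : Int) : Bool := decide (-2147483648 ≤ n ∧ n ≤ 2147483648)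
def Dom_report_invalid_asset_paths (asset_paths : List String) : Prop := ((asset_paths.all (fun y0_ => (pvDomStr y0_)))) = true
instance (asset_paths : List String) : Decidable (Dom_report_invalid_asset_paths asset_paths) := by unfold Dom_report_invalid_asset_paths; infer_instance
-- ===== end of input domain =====

-- B replaces A's accumulator loop with three continue-branches by a single filter over one
-- full-match predicate for a VALID path (the regex /[^\\:*?"<>|]*); idiomatic, same cost.

-- ===== PORT A =====
-- literal port of A's loop: accumulator, three branches appending then continuing
def report_invalid_asset_paths (asset_paths : List String) : List String :=
  asset_paths.foldl (fun invalid_paths path =>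
    if path.toList = [] then invalid_paths ++ [path]
    else if !(PySem.Str.startswith path "/") then invalid_paths ++ [path]
    else if (["\\", ":", "*", "?", "\"", "<", ">", "|"].any
              (fun char => PySem.Str.isIn char path)) then invalid_paths ++ [path]
    else invalid_paths) []

-- ===== PORT B =====
-- the character class [^\\:*?"<>|]
def pvClassOk (c : Char) : Bool :=
  !(c == '\\' || c == ':' || c == '*' || c == '?' || c == '"' || c == '<' || c == '>' || c == '|')

-- re.fullmatch of the pattern /[^\\:*?"<>|]* : exactly one leading '/' then any chars of the class
def pvFullmatchValid (s : String) : Bool :=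
  match s.toList with
  | [] => false
  | c :: rest => c == '/' && rest.all pvClassOk

def report_invalid_asset_paths_alt (asset_paths : List String) : List String :=
  asset_paths.filter (fun p => !pvFullmatchValid p)

-- ===== PRECONDITION & SPEC =====
def Spec_report_invalid_asset_paths (asset_paths : List String) (out : List String) : Prop := out = report_invalid_asset_paths_alt asset_paths
instance (asset_paths : List String) (out : List String) : Decidable (Spec_report_invalid_asset_paths asset_paths out) := by unfold Spec_report_invalid_asset_paths; infer_instance

-- ===== CLAIM (what is proved, stated in full; the proofs are below) =====
def Claim_equal_report_invalid_asset_paths : Prop := ∀ (asset_paths : List String), Dom_report_invalid_asset_paths asset_paths → Spec_report_invalid_asset_paths asset_paths (report_invalid_asset_paths asset_paths)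

-- ===== LEMMAS AND PROOFS =====

-- A's three branch tests, merged into one boolean
def pvCondA (path : String) : Bool :=
  decide (path.toList = []) || !(PySem.Str.startswith path "/") ||
    (["\\", ":", "*", "?", "\"", "<", ">", "|"].any (fun char => PySem.Str.isIn char path))

lemma body_eq (acc : List String) (path : String) :
    (if path.toList = [] then acc ++ [path]
     else if !(PySem.Str.startswith path "/") then acc ++ [path]
     else if (["\\", ":", "*", "?", "\"", "<", ">", "|"].any
              (fun char => PySem.Str.isIn char path)) then acc ++ [path]
     else acc) = (if pvCondA path then acc ++ [path] else acc) := by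
  unfold pvCondA
  by_cases h1 : path.toList = []
  · simp [h1]
  · cases h2 : PySem.Str.startswith path "/"
    · simp [h1, h2]
    · simp [h1, h2]

lemma isIn_lit (t : String) (c : Char) (ht : t.toList = [c]) (s : String) :
    PySem.Str.isIn t s = s.toList.contains c := by
  have h : PySem.Str.isIn t s = true ↔ c ∈ s.toList := by
    rw [PySem.Str.isIn_iff_infix, ht]
    exact List.singleton_infix_iff c s.toList
  apply Bool.coe_iff_coe.mp
  rw [List.contains_iff_mem]
  exact h

lemma startswith_slash (c : Char) (rest : List Char) (s : String) (hs : s.toList = c :: rest) :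
    PySem.Str.startswith s "/" = (c == '/') := by
  have h : PySem.Str.startswith s "/" = true ↔ c = '/' := by
    simp only [PySem.Str.startswith_eq, hs]
    rw [PySem.Chars.startswith_iff]
    show ['/'] <+: c :: rest ↔ c = '/'
    simp [List.cons_prefix_cons, eq_comm]
  apply Bool.coe_iff_coe.mp
  rw [beq_iff_eq]
  exact h

lemma classOk_false_iff (ch : Char) :
    pvClassOk ch = false ↔ ch ∈ ['\\', ':', '*', '?', '"', '<', '>', '|'] := by
  unfold pvClassOk; simp; tauto

lemma contains_disj (rest : List Char) :
    (rest.contains '\\' || (rest.contains ':' || (rest.contains '*' || (rest.contains '?' ||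
     (rest.contains '"' || (rest.contains '<' || (rest.contains '>' || rest.contains '|')))))))
      = !(rest.all pvClassOk) := by
  rcases h : rest.all pvClassOk with _ | _
  · rw [List.all_eq_false] at h
    obtain ⟨ch, hch, hbad⟩ := h
    have hmem := (classOk_false_iff ch).1 (Bool.eq_false_iff.2 hbad)
    simp only [Bool.not_false]
    fin_cases hmem <;> simp [hch]
  · rw [List.all_eq_true] at h
    simp only [Bool.not_true, Bool.or_eq_false_iff]
    refine ⟨?_, ?_, ?_, ?_, ?_, ?_, ?_, ?_⟩ <;>
      (rw [← Bool.not_eq_true, List.contains_iff_mem]; intro hm; have := h _ hm; simp [pvClassOk] at this)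

lemma condA_eq_not_valid (path : String) : pvCondA path = !pvFullmatchValid path := by
  unfold pvCondA pvFullmatchValid
  rcases hs : path.toList with _ | ⟨c, rest⟩
  · simp [hs]
  · rw [startswith_slash c rest path hs]
    simp only [List.any_cons, List.any_nil,
      isIn_lit "\\" '\\' rfl, isIn_lit ":" ':' rfl, isIn_lit "*" '*' rfl,
      isIn_lit "?" '?' rfl, isIn_lit "\"" '"' rfl, isIn_lit "<" '<' rfl,
      isIn_lit ">" '>' rfl, isIn_lit "|" '|' rfl, hs]
    by_cases hc : c = '/'
    · subst hc
      simp only [beq_self_eq_true, Bool.not_true, Bool.false_or, Bool.true_and,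
        List.contains_cons, reduceCtorEq, decide_false]
      simp only [show ('\\' == '/') = false from rfl, show (':' == '/') = false from rfl,
        show ('*' == '/') = false from rfl, show ('?' == '/') = false from rfl,
        show ('"' == '/') = false from rfl, show ('<' == '/') = false from rfl,
        show ('>' == '/') = false from rfl, show ('|' == '/') = false from rfl,
        Bool.false_or, Bool.or_false]
      exact contains_disj rest
    · have hb : (c == '/') = false := by simp [hc]
      simp [hb]

-- ===== VERDICT (by name: the statement is the Claim_ definition above) =====
theorem report_invalid_asset_paths_spec : Claim_equal_report_invalid_asset_paths := by
  intro asset_paths _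
  unfold Spec_report_invalid_asset_paths report_invalid_asset_paths report_invalid_asset_paths_alt
  simp only [body_eq]
  rw [PySem.List.foldl_append_if_eq_filter, List.nil_append]
  exact List.filter_congr (fun x _ => by rw [condA_eq_not_valid])
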